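-- pv_equiv track=rewrite | github.com/JingminSun/LeMON | src/dataset.py | get_non_empty_subsets
-- ===== SOURCE A (Python) =====
-- from itertools import combinations
--
-- def get_non_empty_subsets(lst,min_len=1,max_len=-1):
--     # Create an empty list to store non-empty subsets
--     non_empty_subsets = []
--     if max_len == -1:
--         max_len = len(lst)
--     # Iterate over all possible subset sizes (starting from 1 to exclude the empty set)
--     for r in range(min_len, max_len + 1):
--         # Generate all combinations of the current size
--         subsets_of_size_r = combinations(lst, r)
--
--         # Add each subset to the list of non-empty subsets
--         for subset in subsets_of_size_r:
--             non_empty_subsets.append(list(subset))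
--
--     return non_empty_subsets
-- ===== SOURCE B (Python) =====
-- def get_non_empty_subsets(lst, min_len=1, max_len=-1):
--     n = len(lst)
--     hi = n if max_len == -1 else max_len
--     out = []
--
--     def combos(start, k, path):
--         if k == 0:
--             out.append(path.copy())
--             return
--         # next chosen index can go up to n - k (pruned: enough elements must remain)
--         for i in range(start, n - k + 1):
--             path.append(lst[i])
--             combos(i + 1, k - 1, path)
--             path.pop()
--
--     for r in range(min_len, hi + 1):
--         combos(0, r, [])
--     return out
-- ===== Notes on version B (the rewrite author's own statement) =====
-- stated objective: alternative
-- what changed: Replaces itertools.combinations with a hand-written recursive backtracking helper that picks the next index from start..n-k and builds each subset along a shared path, emitting a copy when k reaches 0 (same index-lexicographic order).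
-- outside the precondition, e.g. on get_non_empty_subsets([1, 2], -2, 1): A raises ValueError, B raises IndexError
import Mathlib
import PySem

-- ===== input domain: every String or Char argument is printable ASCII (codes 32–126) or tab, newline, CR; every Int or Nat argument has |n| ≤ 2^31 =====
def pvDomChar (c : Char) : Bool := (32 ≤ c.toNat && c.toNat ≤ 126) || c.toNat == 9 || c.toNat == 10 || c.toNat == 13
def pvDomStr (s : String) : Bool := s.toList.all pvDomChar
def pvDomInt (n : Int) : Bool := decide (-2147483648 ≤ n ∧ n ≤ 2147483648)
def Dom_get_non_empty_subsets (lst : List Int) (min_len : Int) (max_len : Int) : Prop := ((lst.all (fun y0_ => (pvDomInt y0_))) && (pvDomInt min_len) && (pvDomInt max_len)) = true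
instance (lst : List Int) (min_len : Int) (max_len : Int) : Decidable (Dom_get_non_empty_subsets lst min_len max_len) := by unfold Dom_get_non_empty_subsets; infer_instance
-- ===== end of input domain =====

-- B builds each size-r subset by recursive backtracking over the next chosen index
-- (start..n-k), instead of A's call to itertools.combinations; same order, same cost.

-- ===== PORT A =====
-- itertools.combinations(lst, r): index-lexicographic r-combinations (exact for r ≥ 0,
-- the only case Pre_ admits; Python raises ValueError for negative r).
def pyCombinations : List Int → Nat → List (List Int)
  | _, 0 => [[]]
  | [], _ + 1 => []
  | x :: xs, k + 1 => (pyCombinations xs k).map (fun c => x :: c) ++ pyCombinations xs (k + 1)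

def get_non_empty_subsets (lst : List Int) (min_len : Int) (max_len : Int) : List (List Int) :=
  let max_len' : Int := if max_len = -1 then (lst.length : Int) else max_len
  (PySem.List.pyRange min_len (max_len' + 1) 1).foldl
    (fun acc r => acc ++ pyCombinations lst r.toNat) []

-- ===== PORT B =====
-- combos(start, k, path): pick index i in range(start, n-k+1), extend path with lst[i],
-- recurse with (i+1, k-1); emit a copy of path when k = 0.
def combosB (lst : List Int) (start : Nat) (k : Nat) (path : List Int) : List (List Int) :=
  match k with
  | 0 => [path]
  | k' + 1 =>
    (List.range' start ((lst.length + 1 - (k' + 1)) - start)).foldr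
      (fun i acc => combosB lst (i + 1) k' (path ++ [lst.getD i 0]) ++ acc) []

def get_non_empty_subsets_alt (lst : List Int) (min_len : Int) (max_len : Int) : List (List Int) :=
  let n := lst.length
  let hi : Int := if max_len = -1 then (n : Int) else max_len
  (PySem.List.pyRange min_len (hi + 1) 1).flatMap (fun r => combosB lst 0 r.toNat [])

-- ===== PRECONDITION & SPEC =====
-- Pre_ excludes exactly the inputs on which the range contains a negative size r,
-- where Python's combinations(lst, r) raises ValueError (and B raises IndexError).
def Pre_get_non_empty_subsets (lst : List Int) (min_len : Int) (max_len : Int) : Prop :=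
  0 ≤ min_len ∨ (max_len ≠ -1 ∧ max_len < min_len)
instance (lst : List Int) (min_len : Int) (max_len : Int) : Decidable (Pre_get_non_empty_subsets lst min_len max_len) := by unfold Pre_get_non_empty_subsets; infer_instance

def pvWitness_get_non_empty_subsets : List Int × Int × Int := ([1, 2, 3], 1, -1)

def Spec_get_non_empty_subsets (lst : List Int) (min_len : Int) (max_len : Int) (out : List (List Int)) : Prop := out = get_non_empty_subsets_alt lst min_len max_len
instance (lst : List Int) (min_len : Int) (max_len : Int) (out : List (List Int)) : Decidable (Spec_get_non_empty_subsets lst min_len max_len out) := by unfold Spec_get_non_empty_subsets; infer_instance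

-- ===== CLAIM (what is proved, stated in full; the proofs are below) =====
def Claim_equal_get_non_empty_subsets : Prop := ∀ (lst : List Int) (min_len : Int) (max_len : Int), Dom_get_non_empty_subsets lst min_len max_len → Pre_get_non_empty_subsets lst min_len max_len → Spec_get_non_empty_subsets lst min_len max_len (get_non_empty_subsets lst min_len max_len)

-- ===== LEMMAS AND PROOFS =====

theorem pyCombinations_nil_of_short (ys : List Int) (r : Nat) (h : ys.length < r) :
    pyCombinations ys r = [] := by
  induction ys generalizing r with
  | nil =>
    cases r with
    | zero => omega
    | succ r' => rfl
  | cons x xs ih =>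
    cases r with
    | zero => omega
    | succ r' =>
      have h1 : xs.length < r' := by simp at h; omega
      have h2 : xs.length < r' + 1 := by omega
      simp only [pyCombinations, ih r' h1, ih (r' + 1) h2, List.map_nil, List.append_nil]

theorem combosB_eq (lst : List Int) (d : Nat) :
    ∀ start k path, lst.length - start ≤ d →
      combosB lst start k path = (pyCombinations (lst.drop start) k).map (fun c => path ++ c) := by
  induction d with
  | zero =>
    intro start k path h
    have hs : lst.length ≤ start := by omega
    have hd : lst.drop start = [] := List.drop_eq_nil_of_le hs
    cases k with
    | zero => simp [combosB, pyCombinations]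
    | succ k' =>
      have hm : lst.length + 1 - (k' + 1) - start = 0 := by omega
      simp only [combosB, hm, List.range'_zero, List.foldr_nil, hd]
      simp [pyCombinations_nil_of_short [] (k' + 1) (by simp)]
  | succ d ih =>
    intro start k path h
    cases k with
    | zero => simp [combosB, pyCombinations]
    | succ k' =>
      by_cases hlt : start + k' < lst.length
      · have hm : lst.length + 1 - (k' + 1) - start = (lst.length - k' - start - 1) + 1 := by omega
        have hstart : start < lst.length := by omega
        have hget : lst.getD start 0 = lst[start] := List.getD_eq_getElem lst 0 hstart
        have hdrop : lst.drop start = lst[start] :: lst.drop (start + 1) :=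
          List.drop_eq_getElem_cons hstart
        have hm2 : lst.length + 1 - (k' + 1) - (start + 1) = lst.length - k' - start - 1 := by omega
        have hd1 : lst.length - (start + 1) ≤ d := by omega
        have hrec : combosB lst (start + 1) (k' + 1) path =
            (List.range' (start + 1) (lst.length - k' - start - 1)).foldr
              (fun i acc => combosB lst (i + 1) k' (path ++ [lst.getD i 0]) ++ acc) [] := by
          simp only [combosB, hm2]
        calc combosB lst start (k' + 1) path
            = (List.range' start ((lst.length - k' - start - 1) + 1)).foldr
              (fun i acc => combosB lst (i + 1) k' (path ++ [lst.getD i 0]) ++ acc) [] := by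
              simp only [combosB, hm]
          _ = combosB lst (start + 1) k' (path ++ [lst.getD start 0]) ++
              combosB lst (start + 1) (k' + 1) path := by
              rw [List.range'_succ, List.foldr_cons, hrec]
          _ = (pyCombinations (lst.drop start) (k' + 1)).map (fun c => path ++ c) := by
              rw [ih (start + 1) k' (path ++ [lst.getD start 0]) hd1,
                  ih (start + 1) (k' + 1) path hd1, hdrop]
              simp only [pyCombinations, List.map_append, List.map_map, hget]
              congr 1
              apply List.map_congr_left
              intro c _
              simp
      · have hm : lst.length + 1 - (k' + 1) - start = 0 := by omega
        have hshort : (lst.drop start).length < k' + 1 := by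
          simp [List.length_drop]; omega
        simp only [combosB, hm, List.range'_zero, List.foldr_nil,
          pyCombinations_nil_of_short _ _ hshort, List.map_nil]

theorem combosB_zero (lst : List Int) (k : Nat) :
    combosB lst 0 k [] = pyCombinations lst k := by
  rw [combosB_eq lst lst.length 0 k [] (by omega)]
  simp

-- ===== VERDICT (by name: the statement is the Claim_ definition above) =====
theorem get_non_empty_subsets_spec : Claim_equal_get_non_empty_subsets := by
  intro lst min_len max_len _ _
  unfold Spec_get_non_empty_subsets get_non_empty_subsets get_non_empty_subsets_alt
  rw [PySem.List.foldl_append_eq_flatMap]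
  simp only [List.nil_append]
  apply List.flatMap_congr
  intro r _
  exact (combosB_zero lst r.toNat).symm
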